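-- pv_equiv track=rewrite | github.com/JeremyChim/Dota-Max | script/tab_script.py | tab_down
-- ===== SOURCE A (Python) =====
-- def tab_down(old_str: str):
--     ls = []
--     for i in old_str.split('\n'):
--         if len(i) != 0 and i[0] == '\t':
--             ls.append(i[1:])
--         else:
--             ls.append(i)
--     new_str = '\n'.join(ls)
--     return new_str
-- ===== SOURCE B (Python) =====
-- def tab_down(old_str: str):
--     out = []
--     at_start = True
--     for ch in old_str:
--         if at_start and ch == '\t':
--             at_start = False
--         else:
--             out.append(ch)
--             at_start = ch == '\n'
--     return ''.join(out)
-- ===== Notes on version B (the rewrite author's own statement) =====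
-- stated objective: simpler
-- what changed: Replaced split-into-lines / per-line branch / join with a single character scan that tracks a line-start flag and drops a tab exactly when it occurs at a line start.
import Mathlib
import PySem

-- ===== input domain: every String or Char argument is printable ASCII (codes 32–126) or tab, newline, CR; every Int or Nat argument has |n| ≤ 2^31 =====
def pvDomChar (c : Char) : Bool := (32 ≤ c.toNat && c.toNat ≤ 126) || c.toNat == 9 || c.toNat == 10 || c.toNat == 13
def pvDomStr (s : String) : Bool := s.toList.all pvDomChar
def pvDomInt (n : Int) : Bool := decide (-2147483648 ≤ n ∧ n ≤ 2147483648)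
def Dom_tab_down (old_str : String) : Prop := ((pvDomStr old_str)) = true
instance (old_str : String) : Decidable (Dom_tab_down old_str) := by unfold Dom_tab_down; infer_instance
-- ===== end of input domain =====

-- B replaces A's split-into-lines / per-line branch / join with one character scan tracking a line-start flag (simpler; same cost).

-- ===== PORT A =====
-- A: ls = []; for i in old_str.split('\n'): append i[1:] if len(i) != 0 and i[0] == '\t' else i; return '\n'.join(ls)
-- (ported over .toList via PySem.Chars.splitOn / PySem.Chars.join — exact for str.split('\n') and '\n'.join)
def tab_down (old_str : String) : String :=
  let ls : List (List Char) :=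
    (PySem.Chars.splitOn old_str.toList ['\n']).foldl
      (fun ls i =>
        if i.length ≠ 0 ∧ PySem.List.pyGet? i 0 = some '\t' then
          ls ++ [PySem.Chars.slice i (some 1) none]
        else
          ls ++ [i]) []
  String.ofList (PySem.Chars.join ['\n'] ls)

-- ===== PORT B =====
-- B: out = []; at_start = True; for ch in old_str: drop a tab at line start, else copy ch and set at_start = (ch == '\n'); ''.join(out)
def tab_down_alt (old_str : String) : String :=
  let r :=
    old_str.toList.foldl
      (fun (st : List Char × Bool) ch =>
        if st.2 = true ∧ ch = '\t' then (st.1, false)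
        else (st.1 ++ [ch], decide (ch = '\n')))
      ([], true)
  String.ofList r.1

-- ===== PRECONDITION & SPEC =====
def Spec_tab_down (old_str : String) (out : String) : Prop := out = tab_down_alt old_str
instance (old_str : String) (out : String) : Decidable (Spec_tab_down old_str out) := by unfold Spec_tab_down; infer_instance

-- ===== CLAIM (what is proved, stated in full; the proofs are below) =====
def Claim_equal_tab_down : Prop := ∀ (old_str : String), Dom_tab_down old_str → Spec_tab_down old_str (tab_down old_str)

-- ===== LEMMAS AND PROOFS =====

-- reference splitting of a char list at '\n' (Python's s.split('\n'))
def splitNL : List Char → List (List Char)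
  | [] => [[]]
  | c :: cs =>
    if c = '\n' then [] :: splitNL cs
    else
      match splitNL cs with
      | [] => [[c]]      -- unreachable: splitNL is never []
      | h :: t => (c :: h) :: t

-- the per-line transform A's loop body applies
def fLine (i : List Char) : List Char :=
  if i.length ≠ 0 ∧ PySem.List.pyGet? i 0 = some '\t' then PySem.Chars.slice i (some 1) none else i

-- apply fLine to every line but the first (state of B's scan mid-line)
def mapTail (l : List (List Char)) : List (List Char) :=
  match l with
  | [] => []
  | h :: t => h :: t.map fLine

-- the character stream B's scan emits, as structural recursion
def scanB : List Char → Bool → List Char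
  | [], _ => []
  | c :: cs, st => if st = true ∧ c = '\t' then scanB cs false else c :: scanB cs (decide (c = '\n'))

def consHd (p : List Char) : List (List Char) → List (List Char)
  | [] => [p]
  | h :: t => (p ++ h) :: t

lemma fLine_nil : fLine [] = [] := by simp [fLine]

lemma fLine_cons (c : Char) (r : List Char) :
    fLine (c :: r) = if c = '\t' then r else c :: r := by
  by_cases h : c = '\t' <;>
    simp [fLine, h, PySem.List.pyGet?, PySem.List.pyIdx?, PySem.Chars.slice, PySem.List.slice]

lemma join_cons (x y : List Char) (t : List (List Char)) :
    PySem.Chars.join ['\n'] (x :: y :: t) = x ++ '\n' :: PySem.Chars.join ['\n'] (y :: t) := by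
  simp [PySem.Chars.join, List.intercalate, List.intersperse]

lemma splitNL_ne_nil (cs : List Char) : splitNL cs ≠ [] := by
  cases cs with
  | nil => simp [splitNL]
  | cons c cs =>
    simp only [splitNL]
    split_ifs
    · simp
    · rcases h : splitNL cs with _ | ⟨h1, t⟩ <;> simp

lemma go_spec (fuel : ℕ) : ∀ (l cur : List Char) (accs : List (List Char)),
    l.length ≤ fuel →
    PySem.Chars.splitOn.go ['\n'] fuel l cur accs
      = accs.reverse ++ consHd cur.reverse (splitNL l) := by
  induction fuel with
  | zero =>
    intro l cur accs hl
    have : l = [] := by cases l <;> simp_all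
    subst this
    simp [PySem.Chars.splitOn.go, splitNL, consHd]
  | succ fuel ih =>
    intro l cur accs hl
    cases l with
    | nil => simp [PySem.Chars.splitOn.go, splitNL, consHd]
    | cons c rest =>
      rw [PySem.Chars.splitOn.go]
      by_cases hc : c = '\n'
      · subst hc
        rw [if_pos (by simp [List.isPrefixOf])]
        rw [show List.drop ['\n'].length ('\n' :: rest) = rest from rfl]
        rw [ih rest [] (cur.reverse :: accs) (by simpa using Nat.le_of_succ_le_succ hl)]
        rcases h : splitNL rest with _ | ⟨h1, t⟩
        · exact absurd h (splitNL_ne_nil rest)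
        · simp [splitNL, consHd, h]
      · rw [if_neg (by simp [List.isPrefixOf]; exact fun hh => hc hh.symm)]
        rw [ih rest (c :: cur) accs (by simpa using Nat.le_of_succ_le_succ hl)]
        rcases h : splitNL rest with _ | ⟨h1, t⟩
        · exact absurd h (splitNL_ne_nil rest)
        · simp [splitNL, consHd, h, hc]

lemma splitOn_eq_splitNL (s : List Char) :
    PySem.Chars.splitOn s ['\n'] = splitNL s := by
  rw [PySem.Chars.splitOn, go_spec (s.length + 1) s [] [] (by omega)]
  rcases h : splitNL s with _ | ⟨h1, t⟩
  · exact absurd h (splitNL_ne_nil s)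
  · simp [consHd]

-- B's scan produces exactly A's line-wise transform, joined back with '\n'
lemma scan_join : ∀ (cs : List Char),
    scanB cs true = PySem.Chars.join ['\n'] ((splitNL cs).map fLine)
    ∧ scanB cs false = PySem.Chars.join ['\n'] (mapTail (splitNL cs)) := by
  intro cs
  induction cs with
  | nil => simp [scanB, splitNL, mapTail, fLine_nil]
  | cons c cs ih =>
    obtain ⟨ihT, ihF⟩ := ih
    rcases h : splitNL cs with _ | ⟨h1, t⟩
    · exact absurd h (splitNL_ne_nil cs)
    by_cases hn : c = '\n'
    · subst hn
      have e1 : scanB ('\n' :: cs) true = '\n' :: scanB cs true := by simp [scanB]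
      have e2 : scanB ('\n' :: cs) false = '\n' :: scanB cs true := by simp [scanB]
      have hs : splitNL ('\n' :: cs) = [] :: splitNL cs := by simp [splitNL]
      constructor
      · rw [e1, ihT, hs, List.map_cons, fLine_nil, h, List.map_cons, join_cons]
        simp
      · rw [e2, ihT, hs]
        simp only [mapTail, h, List.map_cons]
        rw [join_cons]
        simp
    · have hs : splitNL (c :: cs) = (c :: h1) :: t := by simp [splitNL, hn, h]
      by_cases hc : c = '\t'
      · constructor
        · subst hc
          have e : scanB ('\t' :: cs) true = scanB cs false := by simp [scanB]
          rw [e, ihF, hs, List.map_cons, fLine_cons, if_pos rfl, h]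
          simp only [mapTail]
        · have e : scanB (c :: cs) false = c :: scanB cs false := by simp [scanB, hn]
          rw [e, ihF, hs]
          simp only [mapTail, h]
          cases t with
          | nil => simp
          | cons a b =>
            simp only [List.map_cons]
            rw [join_cons, join_cons]
            simp
      · have e : ∀ st, scanB (c :: cs) st = c :: scanB cs false := by
          intro st
          simp [scanB, hc, hn]
        constructor
        · rw [e, ihF, hs, List.map_cons, fLine_cons, if_neg hc, h]
          simp only [mapTail]
          cases t with
          | nil => simp
          | cons a b =>
            simp only [List.map_cons]
            rw [join_cons, join_cons]
            simp
        · rw [e, ihF, hs]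
          simp only [mapTail, h]
          cases t with
          | nil => simp
          | cons a b =>
            simp only [List.map_cons]
            rw [join_cons, join_cons]
            simp

-- A's append-loop is map fLine
lemma foldA (parts : List (List Char)) : ∀ (acc : List (List Char)),
    parts.foldl
      (fun ls i =>
        if i.length ≠ 0 ∧ PySem.List.pyGet? i 0 = some '\t' then
          ls ++ [PySem.Chars.slice i (some 1) none]
        else
          ls ++ [i]) acc
      = acc ++ parts.map fLine := by
  induction parts with
  | nil => intro acc; simp
  | cons p ps ih =>
    intro acc
    rw [List.foldl_cons, ih, List.map_cons]
    unfold fLine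
    split_ifs <;> simp

-- B's fold accumulates scanB's stream
lemma foldB (cs : List Char) : ∀ (acc : List Char) (st : Bool),
    (cs.foldl
      (fun (s : List Char × Bool) ch =>
        if s.2 = true ∧ ch = '\t' then (s.1, false)
        else (s.1 ++ [ch], decide (ch = '\n')))
      (acc, st)).1
      = acc ++ scanB cs st := by
  induction cs with
  | nil => intro acc st; simp [scanB]
  | cons c cs ih =>
    intro acc st
    simp only [List.foldl_cons, scanB]
    by_cases h : st = true ∧ c = '\t'
    · rw [if_pos h, if_pos h, ih]
    · rw [if_neg h, if_neg h, ih]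
      simp

-- ===== VERDICT (by name: the statement is the Claim_ definition above) =====
theorem tab_down_spec : Claim_equal_tab_down := by
  intro old_str _
  unfold Spec_tab_down tab_down tab_down_alt
  simp only [splitOn_eq_splitNL, foldA, foldB, List.nil_append]
  rw [(scan_join old_str.toList).1]
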